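-- pv_equiv track=rewrite | github.com/nikita4700/Python | блок 15.py | RemoveRowCol
-- ===== SOURCE A (Python) =====
-- def RemoveRowCol(A, K, L):
--     if K >= len(A) or L >= len(A[0]):
--         return A
--
--     new_matrix = []
--     for i in range(len(A)):
--         if i != K:
--             new_row = []
--             for j in range(len(A[0])):
--                 if j != L:
--                     new_row.append(A[i][j])
--             new_matrix.append(new_row)
--     return new_matrix
-- ===== SOURCE B (Python) =====
-- def RemoveRowCol(A, K, L):
--     if K >= len(A) or L >= len(A[0]):
--         return A
--     result = [row[:] for row in A]
--     del result[K]
--     for row in result: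
--         del row[L]
--     return result
-- ===== Notes on version B (the rewrite author's own statement) =====
-- stated objective: simpler
-- what changed: Instead of A's element-wise rebuild (nested index loops appending every A[i][j] with i != K, j != L), B deep-copies the matrix and deletes in place: del result[K], then del row[L] on each remaining row; Pre_ restricts the body to its natural domain (nonnegative K and L and a rectangular matrix once the guard passes, and not A == [] with K < 0, where A's guard raises), because on negative indices or ragged rows A's no-skip/truncation and B's Python del semantics diverge.
-- outside the precondition, e.g. on RemoveRowCol([[1, 2], [3, 4]], -1, 0): A returns [[2], [4]], B returns [[2]]; on RemoveRowCol([[1, 2], [3, 4]], 0, -1): A returns [[3, 4]], B returns [[3]]; on RemoveRowCol([[1, 2], [3, 4, 5]], 0, 1): A returns [[3]], B returns [[3, 5]]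
import Mathlib
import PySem

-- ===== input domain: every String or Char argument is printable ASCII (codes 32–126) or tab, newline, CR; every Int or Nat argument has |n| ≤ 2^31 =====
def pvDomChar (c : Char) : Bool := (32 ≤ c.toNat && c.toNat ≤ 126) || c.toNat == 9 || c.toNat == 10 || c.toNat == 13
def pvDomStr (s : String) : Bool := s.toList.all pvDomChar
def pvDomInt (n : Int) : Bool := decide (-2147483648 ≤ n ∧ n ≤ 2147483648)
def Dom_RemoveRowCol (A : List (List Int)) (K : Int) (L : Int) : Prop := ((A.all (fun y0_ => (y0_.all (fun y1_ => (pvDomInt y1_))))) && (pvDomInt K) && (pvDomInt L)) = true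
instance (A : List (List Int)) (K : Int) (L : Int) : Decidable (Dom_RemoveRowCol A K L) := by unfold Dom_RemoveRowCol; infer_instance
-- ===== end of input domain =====

-- B replaces A's element-wise rebuild (nested index loops filtering i != K / j != L) by
-- copy-then-delete: deep-copy the matrix, delete row K, delete entry L of each remaining row;
-- objective: simpler. Return-value equivalence only (neither program mutates its argument;
-- B mutates only its own fresh copies).

-- ===== PORT A =====
-- A's guard `K >= len(A) or L >= len(A[0])` short-circuits; `A.headD []` stands for A[0],
-- which Python only evaluates when K < len(A) (A = [] with K < 0 raises and is outside Pre_).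
-- Indices i, j are in range under Pre_, so pyGetD is exact there.
def RemoveRowCol (A : List (List Int)) (K : Int) (L : Int) : List (List Int) :=
  if K ≥ (A.length : Int) then A
  else if L ≥ ((A.headD []).length : Int) then A
  else
    (PySem.List.pyRange 0 (A.length : Int)).foldl
      (fun new_matrix i =>
        if i ≠ K then
          new_matrix ++ [(PySem.List.pyRange 0 ((A.headD []).length : Int)).foldl
            (fun new_row j =>
              if j ≠ L then new_row ++ [PySem.List.pyGetD (PySem.List.pyGetD A i []) j 0]
              else new_row) []]
        else new_matrix) []

-- ===== PORT B =====
-- Source B: `result = [row[:] for row in A]`, `del result[K]`, then `del row[L]` for each row.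
-- `del xs[i]` removes the element at index i (PySem.List.pop? gives that rest); where Python's
-- del would raise IndexError, pop? is none — those inputs are outside Pre_, [] stands in.
def pvDelPy {α : Type} (xs : List α) (i : Int) : List α :=
  match PySem.List.pop? xs i with
  | some p => p.2
  | none => []

def RemoveRowCol_alt (A : List (List Int)) (K : Int) (L : Int) : List (List Int) :=
  if K ≥ (A.length : Int) then A
  else if L ≥ ((A.headD []).length : Int) then A
  else
    let result := A.map (fun row => PySem.List.slice row none none)
    let result := pvDelPy result K
    result.map (fun row => pvDelPy row L)

-- ===== PRECONDITION & SPEC =====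
-- Pre_ restricts the body of the function to its natural domain: when the guard passes
-- (K < len(A) and L < len(A[0])), the indices must be nonnegative and the matrix rectangular —
-- on negative K/L or ragged rows A's and B's readings diverge (A skips nothing for a negative
-- index and truncates/raises on ragged rows; B deletes Python-style from the end and per-row) —
-- and it excludes A = [] with K < 0, where A's own guard raises IndexError on A[0].
def Pre_RemoveRowCol (A : List (List Int)) (K : Int) (L : Int) : Prop :=
  ¬ (A = [] ∧ K < 0) ∧
  (K < (A.length : Int) → L < ((A.headD []).length : Int) →
    0 ≤ K ∧ 0 ≤ L ∧ ∀ r ∈ A, r.length = (A.headD []).length)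
instance (A : List (List Int)) (K : Int) (L : Int) : Decidable (Pre_RemoveRowCol A K L) := by
  unfold Pre_RemoveRowCol; infer_instance

def pvWitness_RemoveRowCol : List (List Int) × Int × Int := ([[1, 2], [3, 4]], 0, 1)

def Spec_RemoveRowCol (A : List (List Int)) (K : Int) (L : Int) (out : List (List Int)) : Prop := out = RemoveRowCol_alt A K L
instance (A : List (List Int)) (K : Int) (L : Int) (out : List (List Int)) : Decidable (Spec_RemoveRowCol A K L out) := by unfold Spec_RemoveRowCol; infer_instance

-- ===== CLAIM (what is proved, stated in full; the proofs are below) =====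
def Claim_equal_RemoveRowCol : Prop := ∀ (A : List (List Int)) (K : Int) (L : Int), Dom_RemoveRowCol A K L → Pre_RemoveRowCol A K L → Spec_RemoveRowCol A K L (RemoveRowCol A K L)

-- ===== LEMMAS AND PROOFS =====

-- canonical form both sides are reduced to: delete index i (here always 0 ≤ i < length)
def pvDel {α : Type} (xs : List α) (i : Int) : List α :=
  xs.take i.toNat ++ xs.drop (i.toNat + 1)

-- B's `del xs[i]` for an in-range nonnegative index is pvDel
theorem pop_rest_eq_pvDel {α : Type} (xs : List α) {i : Int} (h0 : 0 ≤ i)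
    (h : i < (xs.length : Int)) : pvDelPy xs i = pvDel xs i := by
  have hi : i = ((i.toNat : Nat) : Int) := by omega
  unfold pvDelPy
  rw [hi, PySem.List.pop?_natCast xs i.toNat (by omega)]
  have hmax : max i 0 = i := by omega
  simp [pvDel, List.eraseIdx_eq_take_drop_succ, hmax]

-- the shape of both of A's loops: an index loop over range(w) appending F j for every j ≠ L
-- equals deletion of index L from (the first w entries of) the underlying list
theorem fold_drop {β : Type} (F : Int → β) (xs : List β) (L : Int) (h0 : 0 ≤ L) (w : Nat)
    (hF : ∀ j : Nat, j < w → (j : Int) ≠ L → xs[j]? = some (F j)) (init : List β) :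
    (List.map (fun k : Nat => (k : Int)) (List.range w)).foldl
        (fun acc j => if j ≠ L then acc ++ [F j] else acc) init
      = init ++ pvDel (xs.take w) L := by
  induction w generalizing init with
  | zero => simp [pvDel]
  | succ w ih =>
    rw [List.range_succ, List.map_append, List.foldl_append]
    rw [ih (fun j hj => hF j (by omega))]
    simp only [List.map_cons, List.map_nil, List.foldl_cons, List.foldl_nil]
    unfold pvDel
    rw [List.take_take, List.take_take, List.drop_take, List.drop_take]
    by_cases hwL : (w : Int) = L
    · rw [if_neg (by omega)]
      have hl : L.toNat = w := by omega
      rw [hl]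
      simp [show w - (w + 1) = 0 by omega]
    · rw [if_pos hwL]
      have hsome := hF w (by omega) hwL
      have hwlen : w < xs.length := by
        by_contra h
        rw [List.getElem?_eq_none (by omega)] at hsome
        simp at hsome
      have hFw : F w = xs[w] := by
        rw [List.getElem?_eq_getElem hwlen] at hsome
        exact (Option.some.inj hsome).symm
      have htake : xs.take (w + 1) = xs.take w ++ [xs[w]] := by
        rw [List.take_add_one, List.getElem?_eq_getElem hwlen]; rfl
      by_cases hlt : L.toNat < w
      · have hstep : (xs.drop (L.toNat + 1)).take (w - (L.toNat + 1)) ++ [F w]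
            = (xs.drop (L.toNat + 1)).take (w + 1 - (L.toNat + 1)) := by
          rw [show w + 1 - (L.toNat + 1) = (w - (L.toNat + 1)) + 1 by omega,
            List.take_add_one, List.getElem?_drop,
            show L.toNat + 1 + (w - (L.toNat + 1)) = w by omega,
            List.getElem?_eq_getElem hwlen, hFw]
          rfl
        rw [show min L.toNat w = L.toNat by omega,
          show min L.toNat (w + 1) = L.toNat by omega,
          List.append_assoc, List.append_assoc, hstep]
      · rw [show min L.toNat w = w by omega,
          show min L.toNat (w + 1) = w + 1 by omega,
          show w - (L.toNat + 1) = 0 by omega,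
          show w + 1 - (L.toNat + 1) = 0 by omega]
        simp only [List.take_zero, List.append_nil]
        rw [htake, hFw, List.append_assoc]

-- ===== VERDICT (by name: the statement is the Claim_ definition above) =====
theorem RemoveRowCol_spec : Claim_equal_RemoveRowCol := by
  intro A K L _hdom hpre
  unfold Spec_RemoveRowCol RemoveRowCol RemoveRowCol_alt
  by_cases hK : K ≥ (A.length : Int)
  · rw [if_pos hK, if_pos hK]
  · rw [if_neg hK, if_neg hK]
    by_cases hL : L ≥ ((A.headD []).length : Int)
    · rw [if_pos hL, if_pos hL]
    · rw [if_neg hL, if_neg hL]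
      obtain ⟨-, hbody⟩ := hpre
      obtain ⟨hK0, hL0, hrect⟩ := hbody (by omega) (by omega)
      set m : Nat := (A.headD []).length with hm
      -- B side: row[:] copies are the rows, `del result[K]` is pvDel A K
      simp only [PySem.List.slice_none_none, List.map_id_fun', id]
      rw [pop_rest_eq_pvDel A hK0 (by omega)]
      -- A side: reduce both loops with fold_drop
      rw [PySem.List.pyRange_zero_natCast, PySem.List.pyRange_zero_natCast]
      have hinner : ∀ (i : Nat) (hi : i < A.length), (i : Int) ≠ K →
          (List.map (fun k : Nat => (k : Int)) (List.range m)).foldl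
            (fun new_row j =>
              if j ≠ L then new_row ++ [PySem.List.pyGetD (PySem.List.pyGetD A (i : Int) []) j 0]
              else new_row) []
          = pvDel (A[i]'hi) L := by
        intro i hi hiK
        have hgd : PySem.List.pyGetD A (i : Int) [] = A[i]'hi := by
          rw [PySem.List.pyGetD_natCast, List.getD_eq_getElem A [] hi]
        have hlen : (A[i]'hi).length = m := hrect _ (List.getElem_mem hi)
        rw [hgd]
        refine Eq.trans (fold_drop (fun j => PySem.List.pyGetD (A[i]'hi) j 0) (A[i]'hi) L hL0 m
          (fun j hj hjL => by
            have hjlen : j < (A[i]'hi).length := by omega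
            rw [List.getElem?_eq_getElem hjlen]
            exact congrArg some (by
              show (A[i]'hi)[j] = PySem.List.pyGetD (A[i]'hi) (j : Int) 0
              rw [PySem.List.pyGetD_natCast, List.getD_eq_getElem _ _ hjlen])) []) ?_
        rw [List.nil_append, List.take_of_length_le (by omega)]
      refine Eq.trans (fold_drop
        (F := fun i => (List.map (fun k : Nat => (k : Int)) (List.range m)).foldl
            (fun new_row j =>
              if j ≠ L then new_row ++ [PySem.List.pyGetD (PySem.List.pyGetD A i []) j 0]
              else new_row) [])
        (xs := A.map (fun row => pvDel row L)) (L := K) (h0 := hK0) (w := A.length)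
        (fun i hi hiK => by
          have h1 : (A.map (fun row => pvDel row L))[i]? =
              some ((A.map (fun row => pvDel row L))[i]'(by simpa using hi)) :=
            List.getElem?_eq_getElem _
          rw [h1, List.getElem_map]
          exact congrArg some (hinner i hi hiK).symm)
        []) ?_
      rw [List.nil_append, List.take_of_length_le (by simp)]
      -- pvDel commutes with map: deleting row K then deleting L in each row
      unfold pvDel
      rw [List.map_append, List.map_take, List.map_drop]
      have hmap : A.map (fun row => List.take L.toNat row ++ List.drop (L.toNat + 1) row)
          = A.map (fun row => pvDelPy row L) :=
        List.map_congr_left (fun r hr =>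
          (pop_rest_eq_pvDel r hL0 (by rw [hrect r hr]; omega)).symm)
      rw [hmap]
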